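-- pv_equiv track=rewrite | github.com/Srinithi2Aravindan/flightticket- | conditions.py | convert_to_type
-- ===== SOURCE A (Python) =====
-- def convert_to_type(column):
--  s = column
--  res = []
--  for idx, val in enumerate(s):
--     cols = range(val)
--
--     # for leftside columns
--     if(idx == 0):
--         res.append('W')
--         for col in cols[1:-1]:
--             res.append('M')
--         res.append('A')
--
--     # for rightside colums
--     elif(idx == len(s)-1):
--         res.append('A')
--         for col in cols[1:-1]:
--             res.append('M')
--         res.append('W')
--
--     #for middle columns
--     else:
--         res.append('A')
--         for col in cols[1:-1]:
--             res.append('M')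
--         res.append('A')
--  return res
-- ===== SOURCE B (Python) =====
-- def convert_to_type(column):
--     mids = [v - 2 if v > 2 else 0 for v in column]
--     total = sum(m + 2 for m in mids)
--     res = ['M'] * total
--     pos = 0
--     for m in mids:
--         res[pos] = 'A'
--         pos += m + 1
--         res[pos] = 'A'
--         pos += 1
--     if res:
--         res[0] = 'W'
--         res[-1] = 'W'
--     return res
-- ===== Notes on version B (the rewrite author's own statement) =====
-- stated objective: alternative
-- what changed: B preallocates an all-'M' buffer of the total seat count and stamps aisle seats into it by index arithmetic (pos jumps of m+1 and 1), then overwrites the two endpoints with 'W'; A instead appends seat by seat while branching three ways on whether the column index is first, last or middle.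
-- intended difference: On single-column inputs [v] A's idx==0 branch wins over its last-column branch and it returns a block ending in 'A', marking only the left window seat, while B marks both endpoints 'W'; B's value is intended since a single column touches both windows. — e.g. on convert_to_type([3]): A returns ["W", "M", "A"], B returns ["W", "M", "W"]
import Mathlib
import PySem

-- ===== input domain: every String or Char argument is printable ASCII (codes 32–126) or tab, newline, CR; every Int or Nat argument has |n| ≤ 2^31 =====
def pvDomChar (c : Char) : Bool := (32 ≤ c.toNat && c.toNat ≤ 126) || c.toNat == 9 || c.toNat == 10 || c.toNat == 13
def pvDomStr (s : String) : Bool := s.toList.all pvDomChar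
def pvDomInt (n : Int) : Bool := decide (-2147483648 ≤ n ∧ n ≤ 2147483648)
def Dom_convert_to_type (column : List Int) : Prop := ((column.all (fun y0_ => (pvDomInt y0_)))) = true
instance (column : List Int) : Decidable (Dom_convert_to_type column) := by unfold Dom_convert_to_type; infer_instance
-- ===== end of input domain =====

-- B preallocates an all-'M' buffer of the total seat count and stamps aisle/window seats in by
-- index arithmetic (alternative algorithm); on single-column inputs A and B intentionally differ
-- (see D_ below). B mutates only its own fresh list; neither program mutates its argument.


-- ===== PORT A =====
-- literal transliteration: enumerate loop, cols = range(val), inner loops over cols[1:-1]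
def convert_to_type (column : List Int) : List String :=
  (PySem.List.enumerate column 0).foldl (fun res p =>
    let idx := p.1
    let val := p.2
    let cols := PySem.List.pyRange 0 val 1
    let mids := PySem.List.slice cols (some 1) (some (-1))
    if idx = 0 then
      (mids.foldl (fun r _ => r ++ ["M"]) (res ++ ["W"])) ++ ["A"]
    else if idx = (column.length : Int) - 1 then
      (mids.foldl (fun r _ => r ++ ["M"]) (res ++ ["A"])) ++ ["W"]
    else
      (mids.foldl (fun r _ => r ++ ["M"]) (res ++ ["A"])) ++ ["A"]) []

-- ===== PORT B =====
-- literal transliteration of Source B: mid counts, all-'M' buffer of the total length, stamp 'A's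
-- at positions tracked by pos, then res[0]='W', res[-1]='W'
def convert_to_type_alt (column : List Int) : List String :=
  let mids := column.map (fun v => if 2 < v then (v - 2).toNat else 0)
  let total := (mids.map (fun m => m + 2)).sum
  let res0 := List.replicate total "M"
  let res := (mids.foldl (fun (p : List String × Nat) m =>
      let r := p.1.set p.2 "A"
      let pos := p.2 + m + 1
      let r := r.set pos "A"
      (r, pos + 1)) (res0, 0)).1
  if res.isEmpty then res
  else
    let res := res.set 0 "W"
    res.set (res.length - 1) "W"

-- ===== PRECONDITION & SPEC =====
-- On single-column inputs [v] A's idx==0 branch wins over its last-column branch and it returns a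
-- block ending in 'A' (only the left window seat marked), while B marks both endpoints 'W';
-- B's value is intended since a single column touches both windows.
def D_convert_to_type (column : List Int) : Prop := column.length = 1
instance (column : List Int) : Decidable (D_convert_to_type column) := by unfold D_convert_to_type; infer_instance

def Spec_convert_to_type (column : List Int) (out : List String) : Prop := ¬ D_convert_to_type column → out = convert_to_type_alt column
instance (column : List Int) (out : List String) : Decidable (Spec_convert_to_type column out) := by unfold Spec_convert_to_type; infer_instance

def pvDiffWitness_convert_to_type : List Int := [3]
def pvDiffWitnessOut_convert_to_type : (List String) × (List String) := (["W", "M", "A"], ["W", "M", "W"])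

-- ===== CLAIM (what is proved, stated in full; the proofs are below) =====
def Claim_unchanged_convert_to_type : Prop := ∀ (column : List Int), Dom_convert_to_type column → Spec_convert_to_type column (convert_to_type column)
def Claim_changed_convert_to_type : Prop := Dom_convert_to_type (pvDiffWitness_convert_to_type) ∧ D_convert_to_type (pvDiffWitness_convert_to_type) ∧ convert_to_type (pvDiffWitness_convert_to_type) = pvDiffWitnessOut_convert_to_type.1 ∧ convert_to_type_alt (pvDiffWitness_convert_to_type) = pvDiffWitnessOut_convert_to_type.2 ∧ pvDiffWitnessOut_convert_to_type.1 ≠ pvDiffWitnessOut_convert_to_type.2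
def Claim_exact_convert_to_type : Prop := ∀ (column : List Int), Dom_convert_to_type column → D_convert_to_type column → convert_to_type column ≠ convert_to_type_alt column

-- ===== LEMMAS AND PROOFS =====

-- the number of 'M' seats a column of count v contributes
def pvMid (v : Int) : Nat := v.toNat - 2

-- a seat block: x, middles, y
def pvBlk (x y : String) (v : Int) : List String := x :: (List.replicate (pvMid v) "M" ++ [y])

-- tail of A's result (indices ≥ 1): middle blocks 'A…A', last block 'A…W'
def pvAtail : List Int → List String
  | [] => []
  | [v] => pvBlk "A" "W" v
  | v :: w :: t => pvBlk "A" "A" v ++ pvAtail (w :: t)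

-- B's block list before endpoint fixups, indexed by mid counts
def pvJN (ms : List Nat) : List String := ms.flatMap (fun m => "A" :: (List.replicate m "M" ++ ["A"]))

-- the same, indexed by the column counts themselves
def pvJ (l : List Int) : List String := l.flatMap (pvBlk "A" "A")

-- A's loop body as a named function (n = len(s)); definitionally equal to the port's lambda
def pvF (n : Int) : List String → (Int × Int) → List String := fun res p =>
  let idx := p.1
  let val := p.2
  let cols := PySem.List.pyRange 0 val 1
  let mids := PySem.List.slice cols (some 1) (some (-1))
  if idx = 0 then
    (mids.foldl (fun r _ => r ++ ["M"]) (res ++ ["W"])) ++ ["A"]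
  else if idx = n - 1 then
    (mids.foldl (fun r _ => r ++ ["M"]) (res ++ ["A"])) ++ ["W"]
  else
    (mids.foldl (fun r _ => r ++ ["M"]) (res ++ ["A"])) ++ ["A"]

-- B's loop body as a named function
def pvG : (List String × Nat) → Nat → (List String × Nat) := fun p m =>
  let r := p.1.set p.2 "A"
  let pos := p.2 + m + 1
  let r := r.set pos "A"
  (r, pos + 1)

theorem pvA_eq_foldF (column : List Int) :
    convert_to_type column
      = (PySem.List.enumerate column 0).foldl (pvF (column.length : Int)) [] := rfl

theorem pvJ_nil : pvJ [] = [] := rfl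

theorem pvJ_cons (v : Int) (t : List Int) : pvJ (v :: t) = pvBlk "A" "A" v ++ pvJ t := by
  simp [pvJ]

theorem pvMidCount (v : Int) : (if 2 < v then (v - 2).toNat else 0) = pvMid v := by
  unfold pvMid; split <;> omega

theorem pvJN_map (l : List Int) :
    pvJN (l.map (fun v => if 2 < v then (v - 2).toNat else 0)) = pvJ l := by
  induction l with
  | nil => rfl
  | cons v t ih => simp [pvJN, pvJ, pvBlk, pvMidCount] at ih ⊢; simp [ih]

theorem pvFoldlM (l : List Int) (res : List String) :
    l.foldl (fun r _ => r ++ ["M"]) res = res ++ List.replicate l.length "M" := by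
  induction l generalizing res with
  | nil => simp
  | cons x t ih => simp [List.foldl_cons, ih, List.replicate_succ]

theorem pvMidsLen (v : Int) :
    (PySem.List.slice (PySem.List.pyRange 0 v 1) (some 1) (some (-1))).length = pvMid v := by
  rw [PySem.List.length_slice]
  have h1 : PySem.List.clampIdx (PySem.List.pyRange 0 v 1).length (-1)
      = (PySem.List.pyRange 0 v 1).length - 1 := PySem.List.clampIdx_neg_one _
  have h2 : PySem.List.clampIdx (PySem.List.pyRange 0 v 1).length 1
      = min 1 (PySem.List.pyRange 0 v 1).length := by
    simp
  have hl : (PySem.List.pyRange 0 v 1).length = v.toNat := by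
    rw [PySem.List.length_pyRange_one]; omega
  rw [h1, h2, hl]
  unfold pvMid
  omega

-- one A-step, rewritten through pvFoldlM/pvMidsLen
theorem pvAStep (res : List String) (x y : String) (v : Int) :
    ((PySem.List.slice (PySem.List.pyRange 0 v 1) (some 1) (some (-1))).foldl
      (fun r _ => r ++ ["M"]) (res ++ [x])) ++ [y] = res ++ pvBlk x y v := by
  rw [pvFoldlM, pvMidsLen]
  simp [pvBlk]

theorem pvF_zero (n : Int) (res : List String) (v : Int) :
    pvF n res (0, v) = res ++ pvBlk "W" "A" v := by
  exact pvAStep res "W" "A" v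

theorem pvF_last (n : Int) (res : List String) (s v : Int) (h0 : s ≠ 0) (hl : s = n - 1) :
    pvF n res (s, v) = res ++ pvBlk "A" "W" v := by
  unfold pvF
  rw [if_neg h0, if_pos hl, pvAStep]

theorem pvF_mid (n : Int) (res : List String) (s v : Int) (h0 : s ≠ 0) (hl : s ≠ n - 1) :
    pvF n res (s, v) = res ++ pvBlk "A" "A" v := by
  unfold pvF
  rw [if_neg h0, if_neg hl, pvAStep]

-- A's fold over the tail (start index s ≥ 1, s + |l| = n = total length)
theorem pvAtail_fold (n : Int) (l : List Int) :
    ∀ (s : Int) (res : List String), 1 ≤ s → s + l.length = n →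
    (PySem.List.enumerate l s).foldl (pvF n) res = res ++ pvAtail l := by
  induction l with
  | nil => intro s res _ _; simp [PySem.List.enumerate_nil, pvAtail]
  | cons v t ih =>
    intro s res hs hn
    rw [PySem.List.enumerate_cons, List.foldl_cons]
    cases t with
    | nil =>
      rw [PySem.List.enumerate_nil, List.foldl_nil]
      rw [pvF_last n res s v (by omega) (by simp at hn; omega)]
      simp [pvAtail]
    | cons w t' =>
      rw [pvF_mid n res s v (by omega) (by simp at hn ⊢; omega)]
      rw [ih (s + 1) (res ++ pvBlk "A" "A" v) (by omega) (by simp at hn ⊢; omega)]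
      simp [pvAtail]

-- A's characterisation on lists of length ≥ 2
theorem pvA_char (c0 : Int) (rest : List Int) (_h : rest ≠ []) :
    convert_to_type (c0 :: rest) = pvBlk "W" "A" c0 ++ pvAtail rest := by
  rw [pvA_eq_foldF, PySem.List.enumerate_cons, List.foldl_cons, pvF_zero]
  rw [pvAtail_fold ((c0 :: rest).length : Int) rest (0 + 1) _ (by omega)
      (by simp; omega)]
  simp

-- pvG applied, with its lets zeta-reduced
theorem pvG_apply (p : List String × Nat) (m : Nat) :
    pvG p m = ((p.1.set p.2 "A").set (p.2 + m + 1) "A", p.2 + m + 1 + 1) := rfl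

-- B's stamping loop: starting from a stamped prefix and a blank 'M' buffer for ms,
-- it produces prefix ++ pvJN ms
theorem pvB_stamp (ms : List Nat) :
    ∀ (pre : List String),
    (ms.foldl pvG (pre ++ List.replicate ((ms.map (fun m => m + 2)).sum) "M", pre.length)).1
      = pre ++ pvJN ms := by
  induction ms with
  | nil => intro pre; simp [pvJN]
  | cons m t ih =>
    intro pre
    rw [List.foldl_cons, pvG_apply]
    have hcnt : ((m :: t).map (fun m => m + 2)).sum
        = (m + 2) + ((t.map (fun m => m + 2)).sum) := by simp
    have hblk : ("M" :: (List.replicate m "M" ++ ["M"])) = List.replicate (m + 2) "M" := by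
      rw [List.replicate_succ, List.replicate_succ']
    have hbuf : pre ++ List.replicate (((m :: t).map (fun m => m + 2)).sum) "M"
        = (pre ++ ("M" :: (List.replicate m "M" ++ ["M"])))
            ++ List.replicate ((t.map (fun m => m + 2)).sum) "M" := by
      rw [hcnt, List.replicate_add, hblk]
      exact (List.append_assoc _ _ _).symm
    rw [hbuf]
    have h1 : ((pre ++ ("M" :: (List.replicate m "M" ++ ["M"])))
          ++ List.replicate ((t.map (fun m => m + 2)).sum) "M").set pre.length "A"
        = (pre ++ ("A" :: (List.replicate m "M" ++ ["M"])))
          ++ List.replicate ((t.map (fun m => m + 2)).sum) "M" := by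
      rw [List.append_assoc, List.set_append_right _ _ (le_refl _)]
      simp
    rw [h1]
    have hsplit : (pre ++ ("A" :: (List.replicate m "M" ++ ["M"])))
          ++ List.replicate ((t.map (fun m => m + 2)).sum) "M"
        = (pre ++ ("A" :: List.replicate m "M"))
          ++ ("M" :: List.replicate ((t.map (fun m => m + 2)).sum) "M") := by
      simp
    rw [hsplit]
    have hlen : pre.length + m + 1 = (pre ++ ("A" :: List.replicate m "M")).length := by
      simp; omega
    rw [hlen, List.set_append_right _ _ (le_refl _)]
    have h2 : (pre ++ ("A" :: List.replicate m "M"))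
          ++ ("M" :: List.replicate ((t.map (fun m => m + 2)).sum) "M").set 0 "A"
        = (pre ++ ("A" :: (List.replicate m "M" ++ ["A"])))
          ++ List.replicate ((t.map (fun m => m + 2)).sum) "M" := by
      simp
    rw [Nat.sub_self, h2]
    have hlen2 : (pre ++ ("A" :: List.replicate m "M")).length + 1
        = (pre ++ ("A" :: (List.replicate m "M" ++ ["A"]))).length := by
      simp
      omega
    rw [hlen2, ih (pre ++ ("A" :: (List.replicate m "M" ++ ["A"])))]
    simp [pvJN]

-- B's raw buffer after the stamping loop equals pvJ column (lambda = pvG zeta-reduced)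
theorem pvB_loop (column : List Int) :
    (List.foldl
      (fun (p : List String × Nat) m => ((p.1.set p.2 "A").set (p.2 + m + 1) "A", p.2 + m + 1 + 1))
      (List.replicate (((column.map (fun v => if 2 < v then (v - 2).toNat else 0)).map
        (fun m => m + 2)).sum) "M", 0)
      (column.map (fun v => if 2 < v then (v - 2).toNat else 0))).1 = pvJ column := by
  show ((column.map (fun v => if 2 < v then (v - 2).toNat else 0)).foldl pvG
      ([] ++ List.replicate (((column.map (fun v => if 2 < v then (v - 2).toNat else 0)).map
        (fun m => m + 2)).sum) "M", List.length ([] : List String))).1 = pvJ column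
  rw [pvB_stamp]
  simp [pvJN_map]

theorem pvJ_ne_nil (v : Int) (t : List Int) : pvJ (v :: t) ≠ [] := by
  simp [pvJ, pvBlk]

-- setting the last element of B's tail blocks yields A's tail blocks
theorem pvJ_setLast (l : List Int) (_h : l ≠ []) :
    (pvJ l).set ((pvJ l).length - 1) "W" = pvAtail l := by
  induction l with
  | nil => exact absurd rfl _h
  | cons v t ih =>
    cases t with
    | nil =>
      rw [pvJ_cons, pvJ_nil, List.append_nil]
      show (pvBlk "A" "A" v).set ((pvBlk "A" "A" v).length - 1) "W" = pvAtail [v]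
      unfold pvBlk pvAtail pvBlk
      rw [show ("A" :: (List.replicate (pvMid v) "M" ++ ["A"])).length - 1
          = ("A" :: List.replicate (pvMid v) "M").length by simp]
      rw [show ("A" :: (List.replicate (pvMid v) "M" ++ ["A"]))
          = ("A" :: List.replicate (pvMid v) "M") ++ ["A"] by simp]
      rw [List.set_append_right _ _ (le_refl _)]
      simp
    | cons w t' =>
      have hne : pvJ (w :: t') ≠ [] := pvJ_ne_nil w t'
      rw [pvJ_cons]
      have hlen : (pvBlk "A" "A" v ++ pvJ (w :: t')).length - 1
          = (pvBlk "A" "A" v).length + ((pvJ (w :: t')).length - 1) := by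
        have : (pvJ (w :: t')).length ≠ 0 := by simpa using hne
        simp [List.length_append, pvBlk]; omega
      rw [hlen, List.set_append_right _ _ (by omega)]
      rw [Nat.add_sub_cancel_left, ih (by simp)]
      simp [pvAtail]

-- B's result is the stamped buffer with endpoints fixed, on nonempty input
theorem pvB_char_raw (l : List Int) (h : l ≠ []) :
    convert_to_type_alt l = ((pvJ l).set 0 "W").set ((pvJ l).length - 1) "W" := by
  have hne : pvJ l ≠ [] := by
    cases l with
    | nil => exact absurd rfl h
    | cons v t => exact pvJ_ne_nil v t
  simp only [convert_to_type_alt]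
  rw [pvB_loop]
  simp [List.isEmpty_iff, hne]

-- B's characterisation on lists of length ≥ 2
theorem pvB_char (c0 : Int) (rest : List Int) (h : rest ≠ []) :
    convert_to_type_alt (c0 :: rest) = pvBlk "W" "A" c0 ++ pvAtail rest := by
  rw [pvB_char_raw _ (by simp), pvJ_cons]
  have hne : pvJ rest ≠ [] := by
    cases rest with
    | nil => exact absurd rfl h
    | cons v t => exact pvJ_ne_nil v t
  have h0 : (pvBlk "A" "A" c0 ++ pvJ rest).set 0 "W" = pvBlk "W" "A" c0 ++ pvJ rest := by
    simp [pvBlk]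
  rw [h0]
  have hlen : (pvBlk "A" "A" c0 ++ pvJ rest).length - 1
      = (pvBlk "W" "A" c0).length + ((pvJ rest).length - 1) := by
    have : (pvJ rest).length ≠ 0 := by simpa using hne
    simp [List.length_append, pvBlk]; omega
  rw [hlen, List.set_append_right _ _ (by omega), Nat.add_sub_cancel_left,
      pvJ_setLast _ h]

-- the single-column values of the two ports
theorem pvA_single (v : Int) :
    convert_to_type [v] = "W" :: (List.replicate (pvMid v) "M" ++ ["A"]) := by
  rw [pvA_eq_foldF, PySem.List.enumerate_cons, PySem.List.enumerate_nil,
      List.foldl_cons, List.foldl_nil, pvF_zero]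
  simp [pvBlk]

theorem pvB_single (v : Int) :
    convert_to_type_alt [v] = "W" :: (List.replicate (pvMid v) "M" ++ ["W"]) := by
  rw [pvB_char_raw _ (by simp), pvJ_cons, pvJ_nil, List.append_nil]
  have h0 : (pvBlk "A" "A" v).set 0 "W" = pvBlk "W" "A" v := by simp [pvBlk]
  rw [show (pvBlk "A" "A" v).length = (pvBlk "W" "A" v).length by simp [pvBlk], h0]
  unfold pvBlk
  rw [show ("W" :: (List.replicate (pvMid v) "M" ++ ["A"])).length - 1
      = ("W" :: List.replicate (pvMid v) "M").length by simp]
  rw [show ("W" :: (List.replicate (pvMid v) "M" ++ ["A"]))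
      = ("W" :: List.replicate (pvMid v) "M") ++ ["A"] by simp]
  rw [List.set_append_right _ _ (le_refl _)]
  simp

-- ===== VERDICT (by name: the statement is the Claim_ definition above) =====
theorem convert_to_type_spec : Claim_unchanged_convert_to_type := by
  intro column _ hD
  have hlen : column.length ≠ 1 := hD
  show convert_to_type column = convert_to_type_alt column
  match column with
  | [] => rfl
  | [v] => exact absurd rfl hlen
  | c0 :: w :: t =>
    rw [pvA_char c0 (w :: t) (by simp), pvB_char c0 (w :: t) (by simp)]

theorem convert_to_type_changed : Claim_changed_convert_to_type := by
  unfold Claim_changed_convert_to_type; decide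

theorem convert_to_type_tight : Claim_exact_convert_to_type := by
  intro column _ hD
  have hlen : column.length = 1 := hD
  match column with
  | [v] =>
    intro heq
    rw [pvA_single, pvB_single] at heq
    simp at heq
  | [] => simp at hlen
  | c0 :: w :: t => simp at hlen
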